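-- pv_equiv track=rewrite | github.com/ansi-fad/play_candy_crush.py | tests/test_board.py | _is_valid_shape
-- ===== SOURCE A (Python) =====
-- def _is_valid_shape(cells):
--     # Funcție ajutătoare care verifică dacă forma este validă
--
--     rows = {}
--     # Dicționar: cheie = rând, valoare = câte celule sunt pe acel rând
--
--     cols = {}
--     # Dicționar: cheie = coloană, valoare = câte celule sunt pe acea coloană
--
--
--     for r, c in cells:
--         # Parcurgem fiecare celulă din formațiune
--
--         rows.setdefault(r, 0)
--         # Inițializăm contorul pentru rând dacă nu există
--
--         cols.setdefault(c, 0)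
--         # Inițializăm contorul pentru coloană dacă nu există
--
--         rows[r] += 1
--         # Incrementăm numărul de celule pe rândul r
--
--         cols[c] += 1
--         # Incrementăm numărul de celule pe coloana c
--
--
--     has_row = any(v >= 3 for v in rows.values())
--     # True dacă există un rând cu cel puțin 3 celule
--
--     has_col = any(v >= 3 for v in cols.values())
--     # True dacă există o coloană cu cel puțin 3 celule
--
--     return has_row or has_col
-- ===== SOURCE B (Python) =====
-- def _is_valid_shape(cells):
--     # Sort each coordinate list, then a single linear scan looks for a run
--     # of >= 3 equal values (equal values are adjacent after sorting).
--     def has_run(vals):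
--         run = 0
--         prev = None
--         for v in vals:
--             if run > 0 and v == prev:
--                 run += 1
--             else:
--                 run = 1
--                 prev = v
--             if run >= 3:
--                 return True
--         return False
--
--     return has_run(sorted(r for r, _ in cells)) or has_run(sorted(c for _, c in cells))
-- ===== Notes on version B (the rewrite author's own statement) =====
-- stated objective: alternative
-- what changed: Replaces the two frequency dictionaries with sort-then-scan: each coordinate list is sorted and a single linear pass with a run counter detects three equal adjacent values, short-circuiting as soon as a run of 3 is found.
import Mathlib
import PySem

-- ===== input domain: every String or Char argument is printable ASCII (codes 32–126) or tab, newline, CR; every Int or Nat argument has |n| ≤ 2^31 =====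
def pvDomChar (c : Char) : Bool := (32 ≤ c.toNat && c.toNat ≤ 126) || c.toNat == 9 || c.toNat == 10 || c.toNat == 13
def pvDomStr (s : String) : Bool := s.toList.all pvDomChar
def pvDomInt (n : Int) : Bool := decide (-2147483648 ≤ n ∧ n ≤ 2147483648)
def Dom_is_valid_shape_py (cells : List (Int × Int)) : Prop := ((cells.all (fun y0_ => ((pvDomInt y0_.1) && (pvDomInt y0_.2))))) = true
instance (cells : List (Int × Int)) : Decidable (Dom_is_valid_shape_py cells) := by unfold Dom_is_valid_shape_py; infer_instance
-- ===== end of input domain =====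

-- B replaces A's two frequency dictionaries by sort-then-scan (a run counter over each
-- sorted coordinate list, short-circuiting at a run of 3); an alternative decomposition, not claimed faster.

-- ===== PORT A =====
-- for r, c in cells: rows.setdefault(r, 0); cols.setdefault(c, 0); rows[r] += 1; cols[c] += 1
-- then: any(v >= 3 for v in rows.values()) or any(v >= 3 for v in cols.values())
def is_valid_shape_py (cells : List (Int × Int)) : Bool :=
  let st := cells.foldl
    (fun (st : PySem.Dict Int Int × PySem.Dict Int Int) (rc : Int × Int) =>
      let rows := st.1.setdefault rc.1 0
      let cols := st.2.setdefault rc.2 0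
      let rows := rows.modify rc.1 0 (· + 1)
      let cols := cols.modify rc.2 0 (· + 1)
      (rows, cols))
    (PySem.Dict.empty, PySem.Dict.empty)
  let has_row := st.1.values.any (fun v => decide (v ≥ 3))
  let has_col := st.2.values.any (fun v => decide (v ≥ 3))
  has_row || has_col

-- ===== PORT B =====
-- the 'for v in vals' loop of has_run, state (run, prev), early return True at a run of 3
def pvHasRunLoop : List Int → Int → Option Int → Bool
  | [], _, _ => false
  | v :: rest, run, prev =>
      let st := if decide (run > 0) && (prev == some v) then (run + 1, prev) else (1, some v)
      if st.1 ≥ 3 then true else pvHasRunLoop rest st.1 st.2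

def pvHasRun (vals : List Int) : Bool := pvHasRunLoop vals 0 none

def is_valid_shape_py_alt (cells : List (Int × Int)) : Bool :=
  pvHasRun (PySem.List.sorted (cells.map (fun p => p.1)) (fun x => x) false) ||
  pvHasRun (PySem.List.sorted (cells.map (fun p => p.2)) (fun x => x) false)

-- ===== PRECONDITION & SPEC =====
def Spec_is_valid_shape_py (cells : List (Int × Int)) (out : Bool) : Prop := out = is_valid_shape_py_alt cells
instance (cells : List (Int × Int)) (out : Bool) : Decidable (Spec_is_valid_shape_py cells out) := by unfold Spec_is_valid_shape_py; infer_instance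

-- ===== CLAIM (what is proved, stated in full; the proofs are below) =====
def Claim_equal_is_valid_shape_py : Prop := ∀ (cells : List (Int × Int)), Dom_is_valid_shape_py cells → Spec_is_valid_shape_py cells (is_valid_shape_py cells)

-- ===== LEMMAS AND PROOFS =====

-- setdefault-then-increment is exactly the Counter step
theorem pv_sd_modify (d : PySem.Dict Int Int) (k : Int) :
    (d.setdefault k 0).modify k 0 (· + 1) = d.modify k 0 (· + 1) := by
  by_cases h : d.contains k = true
  · rw [PySem.Dict.setdefault_of_contains d 0 h]
  · have h' : d.contains k = false := by simpa using h
    rw [PySem.Dict.setdefault_of_not_contains d 0 h']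
    have hk : ∀ p ∈ d.items, p.1 ≠ k := by
      intro p hp hpk
      exact h (by rw [PySem.Dict.contains_iff_mem_keys, ← hpk]; exact PySem.Dict.mem_keys_of_mem_items d hp)
    have hany : (d.items.any fun p => p.1 == k) = false := by
      simp only [List.any_eq_false]
      intro p hp; simpa using hk p hp
    have hfind : d.items.find? (fun p => p.1 == k) = none := by
      simp only [List.find?_eq_none]
      intro p hp; simpa using hk p hp
    apply PySem.Dict.ext
    simp [PySem.Dict.modify, PySem.Dict.insert, PySem.Dict.contains, PySem.Dict.getD,
      PySem.Dict.get?, hany, hfind, List.find?_append]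
    conv_rhs => rw [← List.map_id d.items]
    exact List.map_congr_left (fun p hp => by simp [hk p hp])

-- A's loop body, rewritten with the Counter step
theorem pv_step_eq : (fun (st : PySem.Dict Int Int × PySem.Dict Int Int) (rc : Int × Int) =>
    let rows := st.1.setdefault rc.1 0
    let cols := st.2.setdefault rc.2 0
    let rows := rows.modify rc.1 0 (· + 1)
    let cols := cols.modify rc.2 0 (· + 1)
    (rows, cols)) = (fun (st : PySem.Dict Int Int × PySem.Dict Int Int) (rc : Int × Int) =>
      (st.1.modify rc.1 0 (· + 1), st.2.modify rc.2 0 (· + 1))) := by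
  funext st rc
  simp only []
  rw [pv_sd_modify, pv_sd_modify]

-- the paired counting fold splits into two independent counting folds
theorem pv_fold_split (cells : List (Int × Int)) (dr dc : PySem.Dict Int Int) :
    cells.foldl (fun (st : PySem.Dict Int Int × PySem.Dict Int Int) rc =>
      (st.1.modify rc.1 0 (· + 1), st.2.modify rc.2 0 (· + 1))) (dr, dc) =
    ((cells.map (fun p => p.1)).foldl (fun d x => d.modify x 0 (· + 1)) dr,
     (cells.map (fun p => p.2)).foldl (fun d x => d.modify x 0 (· + 1)) dc) := by
  induction cells generalizing dr dc with
  | nil => rfl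
  | cons rc rest ih =>
      simp only [List.foldl_cons, List.map_cons]
      exact ih _ _

-- lifting 'some value has count ≥ 3' across one sorted cons step
theorem pv_shift (v : Int) (rest : List Int) (P : Int → Prop) (hPv : P v)
    (hP : ∀ w ∈ rest, w ≠ v → P w) :
    ((3 ≤ 1 + (rest.count v : Int) ∨ ∃ w ∈ rest, w ≠ v ∧ 3 ≤ (rest.count w : Int))
      ↔ ∃ w ∈ v :: rest, P w ∧ 3 ≤ ((v :: rest).count w : Int)) := by
  constructor
  · rintro (h | ⟨w, hw, hwv, hc⟩)
    · refine ⟨v, List.mem_cons_self, hPv, ?_⟩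
      rw [List.count_cons_self]; push_cast; omega
    · refine ⟨w, List.mem_cons_of_mem _ hw, hP w hw hwv, ?_⟩
      rw [List.count_cons_of_ne (Ne.symm hwv)]; exact hc
  · rintro ⟨w, hw, hPw, hc⟩
    by_cases hwv : w = v
    · subst hwv
      left; rw [List.count_cons_self] at hc; push_cast at hc ⊢; omega
    · right
      rw [List.mem_cons] at hw
      rcases hw with rfl | hw
      · exact absurd rfl hwv
      · exact ⟨w, hw, hwv, by rwa [List.count_cons_of_ne (Ne.symm hwv)] at hc⟩

theorem pv_ne_exists (v : Int) (rest : List Int) (p : Int) (hvp : v = p) :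
    ((∃ w ∈ rest, w ≠ p ∧ 3 ≤ (rest.count w : Int))
      ↔ ∃ w ∈ v :: rest, w ≠ p ∧ 3 ≤ ((v :: rest).count w : Int)) := by
  subst hvp
  constructor
  · rintro ⟨w, hw, hwp, hc⟩
    exact ⟨w, List.mem_cons_of_mem _ hw, hwp, by rwa [List.count_cons_of_ne (Ne.symm hwp)]⟩
  · rintro ⟨w, hw, hwp, hc⟩
    rw [List.mem_cons] at hw
    rcases hw with rfl | hw
    · exact absurd rfl hwp
    · exact ⟨w, hw, hwp, by rwa [List.count_cons_of_ne (Ne.symm hwp)] at hc⟩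

-- the key scan invariant: from a live run of r copies of p (1 ≤ r ≤ 2), on a sorted tail
-- bounded below by p, the scan succeeds iff p's run completes or some later value has count ≥ 3
theorem pv_scanG (l : List Int) : ∀ (p r : Int), 1 ≤ r → r ≤ 2 →
    l.Pairwise (· ≤ ·) → (∀ x ∈ l, p ≤ x) →
    (pvHasRunLoop l r (some p) = true ↔
      (3 ≤ r + (l.count p : Int) ∨ ∃ v ∈ l, v ≠ p ∧ 3 ≤ (l.count v : Int))) := by
  induction l with
  | nil => intro p r h1 h2 _ _; simp [pvHasRunLoop]; omega
  | cons v rest ih =>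
      intro p r h1 h2 hpw hlb
      have hrest_pw : rest.Pairwise (· ≤ ·) := hpw.tail
      have hv_le : ∀ x ∈ rest, v ≤ x := fun x hx => (List.pairwise_cons.mp hpw).1 x hx
      by_cases hv : v = p
      · subst hv
        have hcond : (decide (r > 0) && ((some v : Option Int) == some v)) = true := by
          simp; omega
        have hcc : (((v :: rest).count v : Int)) = (rest.count v : Int) + 1 := by
          rw [List.count_cons_self]; push_cast; ring
        by_cases hr2 : r = 2
        · subst hr2
          simp only [pvHasRunLoop, hcond, if_true]
          rw [if_pos (by omega : (2:Int) + 1 ≥ 3)]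
          exact iff_of_true rfl (Or.inl (by rw [hcc]; omega))
        · have hr1 : r = 1 := by omega
          subst hr1
          simp only [pvHasRunLoop, hcond, if_true]
          rw [if_neg (by omega : ¬ ((1:Int) + 1 ≥ 3))]
          rw [show (1:Int) + 1 = 2 by norm_num]
          rw [ih v 2 (by norm_num) (le_refl 2) hrest_pw hv_le]
          rw [← pv_ne_exists v rest v rfl, hcc]
          exact or_congr (by omega) Iff.rfl
      · have hpv : p < v := lt_of_le_of_ne (hlb v (List.mem_cons_self)) (Ne.symm hv)
        have hcp : rest.count p = 0 := by
          rw [List.count_eq_zero]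
          intro hp
          exact absurd rfl (ne_of_gt (lt_of_lt_of_le hpv (hv_le p hp)))
        have hcpc : (((v :: rest).count p : Int)) = 0 := by
          rw [List.count_cons_of_ne hv, hcp]; rfl
        have hcond : ((decide (r > 0)) && ((some p : Option Int) == some v)) = false := by
          simp
          exact fun _ hpe => hv hpe.symm
        simp only [pvHasRunLoop, hcond, Bool.false_eq_true, if_false]
        rw [if_neg (by omega : ¬ ((1:Int) ≥ 3))]
        rw [ih v 1 (le_refl 1) (by norm_num) hrest_pw hv_le]
        rw [pv_shift v rest (· ≠ p) hv
              (fun w hw _ => ne_of_gt (lt_of_lt_of_le hpv (hv_le w hw)))]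
        rw [hcpc]
        constructor
        · exact fun h => Or.inr h
        · rintro (h | h)
          · omega
          · exact h

-- the scan from the initial state on a sorted list detects exactly 'some value occurs ≥ 3 times'
theorem pv_scan_top (l : List Int) (hpw : l.Pairwise (· ≤ ·)) :
    (pvHasRun l = true ↔ ∃ v ∈ l, 3 ≤ (l.count v : Int)) := by
  cases l with
  | nil => simp [pvHasRun, pvHasRunLoop]
  | cons v rest =>
      have hrest_pw : rest.Pairwise (· ≤ ·) := hpw.tail
      have hv_le : ∀ x ∈ rest, v ≤ x := fun x hx => (List.pairwise_cons.mp hpw).1 x hx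
      simp only [pvHasRun, pvHasRunLoop]
      rw [show ((decide ((0:Int) > 0)) && ((none : Option Int) == some v)) = false by simp]
      simp only [Bool.false_eq_true, if_false]
      rw [if_neg (by omega : ¬ ((1:Int) ≥ 3))]
      rw [pv_scanG rest v 1 (le_refl 1) (by norm_num) hrest_pw hv_le]
      rw [pv_shift v rest (fun _ => True) trivial (fun _ _ _ => trivial)]
      simp

-- per coordinate: 'some Counter value ≥ 3' equals B's sorted-scan verdict
theorem pv_component (xs : List Int) :
    ((PySem.Dict.counter xs).values.any (fun v => decide (v ≥ 3))) =
      pvHasRun (PySem.List.sorted xs (fun x => x) false) := by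
  have hpw : (PySem.List.sorted xs (fun x => x) false).Pairwise (· ≤ ·) := by
    simpa using PySem.List.sorted_pairwise xs (fun x => x)
  rw [Bool.eq_iff_iff]
  rw [pv_scan_top _ hpw]
  simp only [PySem.Dict.values, PySem.Dict.items_counter, List.map_map, List.any_map,
    List.any_eq_true, Function.comp, decide_eq_true_eq]
  constructor
  · rintro ⟨k, hk, h3⟩
    refine ⟨k, (PySem.List.mem_sorted _ _ _ _).mpr ((PySem.Set.mem_ofList _ _).mp hk), ?_⟩
    rwa [List.Perm.count_eq (PySem.List.sorted_perm xs _ _)]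
  · rintro ⟨k, hk, h3⟩
    refine ⟨k, (PySem.Set.mem_ofList _ _).mpr ((PySem.List.mem_sorted _ _ _ _).mp hk), ?_⟩
    rwa [List.Perm.count_eq (PySem.List.sorted_perm xs _ _)] at h3

-- ===== VERDICT (by name: the statement is the Claim_ definition above) =====
theorem is_valid_shape_py_spec : Claim_equal_is_valid_shape_py := by
  intro cells _
  unfold Spec_is_valid_shape_py is_valid_shape_py is_valid_shape_py_alt
  simp only [pv_step_eq]
  rw [pv_fold_split]
  rw [show ((cells.map (fun p => p.1)).foldl (fun d x => d.modify x 0 (· + 1)) PySem.Dict.empty)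
        = PySem.Dict.counter (cells.map (fun p => p.1)) from rfl]
  rw [show ((cells.map (fun p => p.2)).foldl (fun d x => d.modify x 0 (· + 1)) PySem.Dict.empty)
        = PySem.Dict.counter (cells.map (fun p => p.2)) from rfl]
  rw [pv_component, pv_component]
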